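-- pv_equiv track=rewrite | github.com/Nexmurco/advent-of-code | 2023/18/mega_magma_trenches.py | get_connections
-- ===== SOURCE A (Python) =====
-- from enum import Enum
--
-- def move(pos, dir, max_x, max_y):
--     if dir == Dir.up and pos[1] > 0:
--         return (pos[0], pos[1] - 1)
--     elif dir == Dir.right and pos[0] < max_x:
--         return (pos[0] + 1, pos[1])
--     elif dir == Dir.down and pos[1] < max_y:
--         return (pos[0], pos[1] + 1)
--     elif dir == Dir.left and pos[0] > 0:
--         return (pos[0] - 1, pos[1])
--
--     return None
--
-- class Dir(Enum):
--     up = 1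
--     right = 2
--     down = 3
--     left = 4
--
-- def get_connections(the_grid, ):
--     connected_edges = set()
--     for i in range(len(the_grid)):
--         for j in range(len(the_grid[i])):
--             cell = the_grid[i][j]
--             if cell["zone"] == "Inside":
--                 for d in Dir:
--                     pos = (j,i)
--                     adj = move(pos, d, len(the_grid[i])-1, len(the_grid)-1)
--
--                     if adj is not None and the_grid[adj[1]][adj[0]]["zone"] == "Inside":
--                         if pos[0] < adj[0]:
--                             n1 = pos
--                             n2 = adj
--                         elif adj[0] < pos[0]:
--                             n1 = adj
--                             n2 = pos
--                         else:
--                             if pos[1] <= adj[1]: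
--                                 n1 = pos
--                                 n2 = adj
--                             else:
--                                 n1 = adj
--                                 n2 = pos
--
--                         connected_edges.add((n1, n2))
--     return connected_edges
-- ===== SOURCE B (Python) =====
-- def get_connections(the_grid, ):
--     edges = set()
--     n = len(the_grid)
--     for i, row in enumerate(the_grid):
--         for j, cell in enumerate(row):
--             if cell["zone"] == "Inside":
--                 if j + 1 < len(row) and row[j + 1]["zone"] == "Inside":
--                     edges.add(((j, i), (j + 1, i)))
--                 if i + 1 < n:
--                     below = the_grid[i + 1]
--                     if j < len(below) and below[j]["zone"] == "Inside":
--                         edges.add(((j, i), (j, i + 1)))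
--     return edges
-- ===== Notes on version B (the rewrite author's own statement) =====
-- stated objective: simpler
-- what changed: Drops the Dir enum, the move() clamping helper and the n1/n2 coordinate normalization: B scans each Inside cell once and inspects only its right and down neighbors, adding the edge in canonical order directly, so every edge is added exactly once instead of being discovered from both endpoints and deduplicated by the set.
import Mathlib
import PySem

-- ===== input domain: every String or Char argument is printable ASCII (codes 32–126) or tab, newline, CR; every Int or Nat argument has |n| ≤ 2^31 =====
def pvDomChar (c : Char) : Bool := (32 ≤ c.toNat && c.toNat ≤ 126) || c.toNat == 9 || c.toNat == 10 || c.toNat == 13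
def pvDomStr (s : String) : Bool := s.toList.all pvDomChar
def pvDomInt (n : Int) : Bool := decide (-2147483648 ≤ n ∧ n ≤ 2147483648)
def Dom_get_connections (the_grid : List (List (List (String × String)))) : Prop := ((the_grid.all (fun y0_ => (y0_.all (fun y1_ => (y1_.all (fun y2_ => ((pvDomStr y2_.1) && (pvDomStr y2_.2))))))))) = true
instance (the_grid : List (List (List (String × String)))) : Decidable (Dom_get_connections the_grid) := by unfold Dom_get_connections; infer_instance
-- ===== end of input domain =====

-- B drops the Dir enum, move() helper and n1/n2 normalization: it scans each Inside cell once and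
-- adds the right- and down-neighbor edges directly in canonical order, so each edge is added once
-- instead of being discovered from both endpoints and deduplicated by the set (objective: simpler).


-- ===== PORT A =====
-- the_grid[y] / row[x]: in range wherever Python A does not raise IndexError (outside Pre_ the
-- default [] is unreachable on the Python side)
def pvRowAt (g : List (List (List (String × String)))) (y : Int) : List (List (String × String)) :=
  (PySem.List.pyGet? g y).getD []

def pvCellAt (g : List (List (List (String × String)))) (y x : Int) : List (String × String) :=
  (PySem.List.pyGet? (pvRowAt g y) x).getD []

-- cell["zone"]: first-match association-list lookup; the key is present under Pre_ (KeyError excluded)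
def pvZone (cell : List (String × String)) : String := (cell.lookup "zone").getD ""

-- move(pos, dir, max_x, max_y); Dir.up/right/down/left encoded as 1/2/3/4 (the Enum values)
def pvMove (pos : Int × Int) (d : Nat) (max_x max_y : Int) : Option (Int × Int) :=
  if d = 1 ∧ 0 < pos.2 then some (pos.1, pos.2 - 1)
  else if d = 2 ∧ pos.1 < max_x then some (pos.1 + 1, pos.2)
  else if d = 3 ∧ pos.2 < max_y then some (pos.1, pos.2 + 1)
  else if d = 4 ∧ 0 < pos.1 then some (pos.1 - 1, pos.2)
  else none

def get_connections (the_grid : List (List (List (String × String)))) : List ((Int × Int) × (Int × Int)) :=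
  (PySem.List.pyRange 0 (the_grid.length : Int) 1).foldl (fun s i =>
    (PySem.List.pyRange 0 ((pvRowAt the_grid i).length : Int) 1).foldl (fun s j =>
      let cell := pvCellAt the_grid i j
      if pvZone cell == "Inside" then
        [1, 2, 3, 4].foldl (fun s d =>
          let pos : Int × Int := (j, i)
          match pvMove pos d (((pvRowAt the_grid i).length : Int) - 1) ((the_grid.length : Int) - 1) with
          | none => s
          | some adj =>
            if pvZone (pvCellAt the_grid adj.2 adj.1) == "Inside" then
              let nn : (Int × Int) × (Int × Int) :=
                if pos.1 < adj.1 then (pos, adj)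
                else if adj.1 < pos.1 then (adj, pos)
                else if pos.2 ≤ adj.2 then (pos, adj) else (adj, pos)
              PySem.Set.add s nn
            else s) s
      else s) s) PySem.Set.empty

-- ===== PORT B =====
-- cell["zone"] == "Inside": first-match lookup compared against "Inside"; exact under Pre_
-- (the "zone" key is present there; KeyError is excluded by Pre_)
def pvInside (cell : List (String × String)) : Bool := cell.lookup "zone" == some "Inside"

def get_connections_alt (the_grid : List (List (List (String × String)))) : List ((Int × Int) × (Int × Int)) :=
  (PySem.List.enumerate the_grid 0).foldl (fun s p =>
    (PySem.List.enumerate p.2 0).foldl (fun s q =>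
      if pvInside q.2 then
        -- if j + 1 < len(row) and row[j+1]["zone"] == "Inside"  (index in range when read)
        let s1 := if q.1 + 1 < (p.2.length : Int) &&
                     pvInside ((PySem.List.pyGet? p.2 (q.1 + 1)).getD []) then
                    PySem.Set.add s ((q.1, p.1), (q.1 + 1, p.1))
                  else s
        if p.1 + 1 < (the_grid.length : Int) then
          let below := (PySem.List.pyGet? the_grid (p.1 + 1)).getD []
          if q.1 < (below.length : Int) &&
             pvInside ((PySem.List.pyGet? below q.1).getD []) then
            PySem.Set.add s1 ((q.1, p.1), (q.1, p.1 + 1))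
          else s1
        else s1
      else s) s) PySem.Set.empty

-- ===== PRECONDITION & SPEC =====
-- Pre_ excludes exactly the inputs on which Python A raises: a cell without a "zone" key
-- (KeyError — A reads cell["zone"] of every cell) and grids where an Inside cell's up/down
-- neighbor probe the_grid[i∓1][j] hits a shorter adjacent row (IndexError on ragged grids).
def Pre_get_connections (the_grid : List (List (List (String × String)))) : Prop :=
  (∀ row ∈ the_grid, ∀ cell ∈ row, (cell.lookup "zone").isSome) ∧
  (∀ i : Nat, ∀ _ : i < the_grid.length, ∀ j : Nat, ∀ _ : j < (the_grid[i]?.getD []).length,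
    pvInside ((the_grid[i]?.getD [])[j]?.getD []) = true →
      (1 ≤ i → j < (the_grid[i-1]?.getD []).length) ∧
      (i + 1 < the_grid.length → j < (the_grid[i+1]?.getD []).length))
instance (the_grid : List (List (List (String × String)))) : Decidable (Pre_get_connections the_grid) := by
  unfold Pre_get_connections; infer_instance

def pvWitness_get_connections : (List (List (List (String × String)))) :=
  [[[("zone", "Inside")], [("zone", "Inside")]], [[("zone", "Inside")], [("zone", "Outside")]]]

def Spec_get_connections (the_grid : List (List (List (String × String)))) (out : List ((Int × Int) × (Int × Int))) : Prop := out = get_connections_alt the_grid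
instance (the_grid : List (List (List (String × String)))) (out : List ((Int × Int) × (Int × Int))) : Decidable (Spec_get_connections the_grid out) := by unfold Spec_get_connections; infer_instance

-- ===== CLAIM (what is proved, stated in full; the proofs are below) =====
def Claim_equal_get_connections : Prop := ∀ (the_grid : List (List (List (String × String)))), Dom_get_connections the_grid → Pre_get_connections the_grid → Spec_get_connections the_grid (get_connections the_grid)

-- ===== LEMMAS AND PROOFS =====

-- proof-side abbreviations over Nat coordinates
def insideN (g : List (List (List (String × String)))) (i j : Nat) : Bool :=
  pvInside ((g[i]?.getD [])[j]?.getD [])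

def eR (i j : Nat) : (Int × Int) × (Int × Int) := (((j : Int), (i : Int)), ((j : Int) + 1, (i : Int)))
def eD (i j : Nat) : (Int × Int) × (Int × Int) := (((j : Int), (i : Int)), ((j : Int), (i : Int) + 1))

def cR (g : List (List (List (String × String)))) (i j : Nat) : Bool := insideN g i j && insideN g i (j+1)
def cD (g : List (List (List (String × String)))) (i j : Nat) : Bool := insideN g i j && insideN g (i+1) j

-- B's per-cell step in Nat-indexed normal form
def sB (g : List (List (List (String × String)))) (i j : Nat)
    (s : List ((Int × Int) × (Int × Int))) : List ((Int × Int) × (Int × Int)) :=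
  if insideN g i j then
    let s1 := if insideN g i (j+1) then PySem.Set.add s (eR i j) else s
    if insideN g (i+1) j then PySem.Set.add s1 (eD i j) else s1
  else s

-- A's per-cell step: dA is the literal direction-loop body, sA the literal cell body
def dA (g : List (List (List (String × String)))) (i j : Int)
    (s : List ((Int × Int) × (Int × Int))) (d : Nat) : List ((Int × Int) × (Int × Int)) :=
  let pos : Int × Int := (j, i)
  match pvMove pos d (((pvRowAt g i).length : Int) - 1) ((g.length : Int) - 1) with
  | none => s
  | some adj =>
    if pvZone (pvCellAt g adj.2 adj.1) == "Inside" then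
      let nn : (Int × Int) × (Int × Int) :=
        if pos.1 < adj.1 then (pos, adj)
        else if adj.1 < pos.1 then (adj, pos)
        else if pos.2 ≤ adj.2 then (pos, adj) else (adj, pos)
      PySem.Set.add s nn
    else s

def sA (g : List (List (List (String × String)))) (i j : Int)
    (s : List ((Int × Int) × (Int × Int))) : List ((Int × Int) × (Int × Int)) :=
  let cell := pvCellAt g i j
  if pvZone cell == "Inside" then [1, 2, 3, 4].foldl (dA g i j) s else s

theorem pvZone_eq_pvInside (c : List (String × String)) :
    (pvZone c == "Inside") = pvInside c := by
  unfold pvZone pvInside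
  cases h : c.lookup "zone" <;> simp

theorem cellAt_natCast (g : List (List (List (String × String)))) (i j : Nat) :
    pvCellAt g (i : Int) (j : Int) = (g[i]?.getD [])[j]?.getD [] := by
  simp [pvCellAt, pvRowAt, PySem.List.pyGet?_natCast]

theorem mem_sB (g : List (List (List (String × String)))) (i j : Nat) (s : List ((Int × Int) × (Int × Int)))
    {x : (Int × Int) × (Int × Int)} (hx : x ∈ s) : x ∈ sB g i j s := by
  unfold sB
  split_ifs <;> simp_all [PySem.Set.mem_add]

theorem sB_right (g : List (List (List (String × String)))) (i j : Nat) (s : List ((Int × Int) × (Int × Int)))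
    (h : cR g i j = true) : eR i j ∈ sB g i j s := by
  unfold cR at h
  simp only [Bool.and_eq_true] at h
  unfold sB
  simp only [h.1, h.2, if_true]
  split_ifs <;> simp [PySem.Set.mem_add]

theorem sB_down (g : List (List (List (String × String)))) (i j : Nat) (s : List ((Int × Int) × (Int × Int)))
    (h : cD g i j = true) : eD i j ∈ sB g i j s := by
  unfold cD at h
  simp only [Bool.and_eq_true] at h
  unfold sB
  simp only [h.1, h.2, if_true]
  simp [PySem.Set.mem_add]

theorem insideN_lt {g : List (List (List (String × String)))} {i j : Nat}
    (h : insideN g i j = true) : j < (g[i]?.getD []).length := by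
  by_contra hc
  unfold insideN at h
  rw [List.getElem?_eq_none (show (g[i]?.getD []).length ≤ j by omega)] at h
  simp [pvInside] at h

theorem insideN_lt_rows {g : List (List (List (String × String)))} {i j : Nat}
    (h : insideN g i j = true) : i < g.length := by
  by_contra hc
  unfold insideN at h
  rw [show g[i]? = none from List.getElem?_eq_none (show g.length ≤ i by omega)] at h
  simp [pvInside] at h

theorem dA_up (g : List (List (List (String × String)))) (i j : Nat) (s : List ((Int × Int) × (Int × Int))) :
    dA g (i : Int) (j : Int) s 1 =
      if 1 ≤ i ∧ insideN g (i-1) j = true then PySem.Set.add s (eD (i-1) j) else s := by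
  unfold dA pvMove
  dsimp only
  by_cases hi : 1 ≤ i
  · conv_lhs => rw [if_pos (show (1 = 1 ∧ 0 < (i:Int)) from ⟨rfl, by omega⟩)]
    dsimp only
    rw [show ((i:Int) - 1) = ((i-1:Nat):Int) from by omega]
    simp only [cellAt_natCast, pvZone_eq_pvInside]
    rw [if_neg (show ¬((j:Int) < (j:Int)) from by omega),
        if_neg (show ¬((j:Int) < (j:Int)) from by omega),
        if_neg (show ¬((i:Int) ≤ ((i-1:Nat):Int)) from by omega)]
    rw [show ((((j:Int), ((i-1:Nat):Int)) : Int × Int), (((j:Int), (i:Int)) : Int × Int)) = eD (i-1) j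
        from by simp [eD]; try omega]
    simp only [insideN, hi, true_and]
  · conv_lhs =>
      rw [if_neg (show ¬(1 = 1 ∧ 0 < (i:Int)) from by rintro ⟨-, h⟩; omega),
          if_neg (show ¬(1 = 2 ∧ (j:Int) < ((pvRowAt g (i:Int)).length : Int) - 1) from by rintro ⟨h, -⟩; omega),
          if_neg (show ¬(1 = 3 ∧ (i:Int) < (g.length : Int) - 1) from by rintro ⟨h, -⟩; omega),
          if_neg (show ¬(1 = 4 ∧ 0 < (j:Int)) from by rintro ⟨h, -⟩; omega)]
    dsimp only
    rw [if_neg (show ¬(1 ≤ i ∧ insideN g (i-1) j = true) from by rintro ⟨h, -⟩; omega)]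

theorem dA_right (g : List (List (List (String × String)))) (i j : Nat) (s : List ((Int × Int) × (Int × Int))) :
    dA g (i : Int) (j : Int) s 2 =
      if insideN g i (j+1) = true then PySem.Set.add s (eR i j) else s := by
  have hrow : pvRowAt g (i : Int) = g[i]?.getD [] := by
    simp [pvRowAt, PySem.List.pyGet?_natCast]
  unfold dA pvMove
  dsimp only
  by_cases hc : (j : Int) < ((pvRowAt g (i:Int)).length : Int) - 1
  · conv_lhs =>
      rw [if_neg (show ¬(2 = 1 ∧ 0 < (i:Int)) from by rintro ⟨h, -⟩; omega)]
    conv_lhs => rw [if_pos (show (2 = 2 ∧ (j:Int) < ((pvRowAt g (i:Int)).length : Int) - 1) from ⟨rfl, hc⟩)]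
    dsimp only
    rw [show ((j:Int) + 1) = ((j+1:Nat):Int) from by omega]
    simp only [cellAt_natCast, pvZone_eq_pvInside]
    rw [if_pos (show (j:Int) < ((j+1:Nat):Int) from by omega)]
    rw [show ((((j:Int), (i:Int)) : Int × Int), ((((j+1:Nat):Int), (i:Int)) : Int × Int)) = eR i j
        from by simp [eR]; try omega]
    simp [insideN]
  · conv_lhs =>
      rw [if_neg (show ¬(2 = 1 ∧ 0 < (i:Int)) from by rintro ⟨h, -⟩; omega),
          if_neg (show ¬(2 = 2 ∧ (j:Int) < ((pvRowAt g (i:Int)).length : Int) - 1) from by rintro ⟨-, h⟩; exact hc h),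
          if_neg (show ¬(2 = 3 ∧ (i:Int) < (g.length : Int) - 1) from by rintro ⟨h, -⟩; omega),
          if_neg (show ¬(2 = 4 ∧ 0 < (j:Int)) from by rintro ⟨h, -⟩; omega)]
    dsimp only
    rw [if_neg (show ¬(insideN g i (j+1) = true) from by
      intro hz
      have := insideN_lt hz
      rw [hrow] at hc
      omega)]

theorem dA_down (g : List (List (List (String × String)))) (i j : Nat) (s : List ((Int × Int) × (Int × Int))) :
    dA g (i : Int) (j : Int) s 3 =
      if insideN g (i+1) j = true then PySem.Set.add s (eD i j) else s := by
  unfold dA pvMove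
  dsimp only
  by_cases hc : (i : Int) < (g.length : Int) - 1
  · conv_lhs =>
      rw [if_neg (show ¬(3 = 1 ∧ 0 < (i:Int)) from by rintro ⟨h, -⟩; omega),
          if_neg (show ¬(3 = 2 ∧ (j:Int) < ((pvRowAt g (i:Int)).length : Int) - 1) from by rintro ⟨h, -⟩; omega)]
    conv_lhs => rw [if_pos (show (3 = 3 ∧ (i:Int) < (g.length : Int) - 1) from ⟨rfl, hc⟩)]
    dsimp only
    rw [show ((i:Int) + 1) = ((i+1:Nat):Int) from by omega]
    simp only [cellAt_natCast, pvZone_eq_pvInside]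
    rw [if_neg (show ¬((j:Int) < (j:Int)) from by omega),
        if_neg (show ¬((j:Int) < (j:Int)) from by omega),
        if_pos (show (i:Int) ≤ ((i+1:Nat):Int) from by omega)]
    rw [show ((((j:Int), (i:Int)) : Int × Int), (((j:Int), ((i+1:Nat):Int)) : Int × Int)) = eD i j
        from by simp [eD]; try omega]
    simp [insideN]
  · conv_lhs =>
      rw [if_neg (show ¬(3 = 1 ∧ 0 < (i:Int)) from by rintro ⟨h, -⟩; omega),
          if_neg (show ¬(3 = 2 ∧ (j:Int) < ((pvRowAt g (i:Int)).length : Int) - 1) from by rintro ⟨h, -⟩; omega),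
          if_neg (show ¬(3 = 3 ∧ (i:Int) < (g.length : Int) - 1) from by rintro ⟨-, h⟩; exact hc h),
          if_neg (show ¬(3 = 4 ∧ 0 < (j:Int)) from by rintro ⟨h, -⟩; omega)]
    dsimp only
    rw [if_neg (show ¬(insideN g (i+1) j = true) from by
      intro hz
      have := insideN_lt_rows hz
      omega)]

theorem dA_left (g : List (List (List (String × String)))) (i j : Nat) (s : List ((Int × Int) × (Int × Int))) :
    dA g (i : Int) (j : Int) s 4 =
      if 1 ≤ j ∧ insideN g i (j-1) = true then PySem.Set.add s (eR i (j-1)) else s := by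
  unfold dA pvMove
  dsimp only
  by_cases hj : 1 ≤ j
  · conv_lhs =>
      rw [if_neg (show ¬(4 = 1 ∧ 0 < (i:Int)) from by rintro ⟨h, -⟩; omega),
          if_neg (show ¬(4 = 2 ∧ (j:Int) < ((pvRowAt g (i:Int)).length : Int) - 1) from by rintro ⟨h, -⟩; omega),
          if_neg (show ¬(4 = 3 ∧ (i:Int) < (g.length : Int) - 1) from by rintro ⟨h, -⟩; omega)]
    conv_lhs => rw [if_pos (show (4 = 4 ∧ 0 < (j:Int)) from ⟨rfl, by omega⟩)]
    dsimp only
    rw [show ((j:Int) - 1) = ((j-1:Nat):Int) from by omega]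
    simp only [cellAt_natCast, pvZone_eq_pvInside]
    rw [if_neg (show ¬((j:Int) < ((j-1:Nat):Int)) from by omega),
        if_pos (show ((j-1:Nat):Int) < (j:Int) from by omega)]
    rw [show (((((j-1:Nat):Int), (i:Int)) : Int × Int), (((j:Int), (i:Int)) : Int × Int)) = eR i (j-1)
        from by simp [eR]; try omega]
    simp only [insideN, hj, true_and]
  · conv_lhs =>
      rw [if_neg (show ¬(4 = 1 ∧ 0 < (i:Int)) from by rintro ⟨h, -⟩; omega),
          if_neg (show ¬(4 = 2 ∧ (j:Int) < ((pvRowAt g (i:Int)).length : Int) - 1) from by rintro ⟨h, -⟩; omega),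
          if_neg (show ¬(4 = 3 ∧ (i:Int) < (g.length : Int) - 1) from by rintro ⟨h, -⟩; omega),
          if_neg (show ¬(4 = 4 ∧ 0 < (j:Int)) from by rintro ⟨-, h⟩; omega)]
    dsimp only
    rw [if_neg (show ¬(1 ≤ j ∧ insideN g i (j-1) = true) from by rintro ⟨h, -⟩; omega)]

-- per-cell equality: A's four-direction pass equals B's right/down pass, given that the up and
-- left edges (when both endpoints are Inside) are already in the accumulator
theorem cell_eq (g : List (List (List (String × String)))) (i j : Nat)
    (s : List ((Int × Int) × (Int × Int)))
    (Hup : cD g (i-1) j = true → 1 ≤ i → eD (i-1) j ∈ s)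
    (Hleft : cR g i (j-1) = true → 1 ≤ j → eR i (j-1) ∈ s) :
    sA g (i : Int) (j : Int) s = sB g i j s := by
  unfold sA sB
  simp only [cellAt_natCast, pvZone_eq_pvInside]
  cases h0 : insideN g i j with
  | false => simp only [insideN] at h0; simp [h0]
  | true =>
    have h0' := h0
    simp only [insideN] at h0'
    simp only [h0', if_true]
    rw [show ([1,2,3,4].foldl (dA g (i:Int) (j:Int)) s) =
        dA g (i:Int) (j:Int) (dA g (i:Int) (j:Int) (dA g (i:Int) (j:Int) (dA g (i:Int) (j:Int) s 1) 2) 3) 4 from rfl]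
    rw [dA_up, dA_right, dA_down, dA_left]
    -- step 1 (up) is an add of an edge already in s
    have h1 : (if 1 ≤ i ∧ insideN g (i-1) j = true then PySem.Set.add s (eD (i-1) j) else s) = s := by
      split_ifs with h
      · exact PySem.Set.add_of_mem (Hup (by
          unfold cD
          rw [Bool.and_eq_true]
          exact ⟨h.2, by rw [show (i-1)+1 = i by omega]; exact h0⟩) h.1)
      · rfl
    rw [h1]
    -- step 4 (left) is an add of an edge already present
    set s3 := (if insideN g (i+1) j = true then
        PySem.Set.add (if insideN g i (j+1) = true then PySem.Set.add s (eR i j) else s) (eD i j)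
      else (if insideN g i (j+1) = true then PySem.Set.add s (eR i j) else s)) with hs3
    have hmono : ∀ x ∈ s, x ∈ s3 := by
      intro x hx
      rw [hs3]
      split_ifs <;> simp_all [PySem.Set.mem_add]
    split_ifs with h4
    · exact PySem.Set.add_of_mem (hmono _ (Hleft (by
        unfold cR
        rw [Bool.and_eq_true]
        exact ⟨h4.2, by rw [show (j-1)+1 = j by omega]; exact h0⟩) h4.1))
    · rfl

-- row-level induction: processing cells j0..j0+k-1 of row i with A's step equals B's step,
-- provided the up-edges of the whole previous row and the left-edge at j0 are already present
theorem row_eq (g : List (List (List (String × String)))) (i : Nat) :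
    ∀ (k j0 : Nat) (s : List ((Int × Int) × (Int × Int))),
    (∀ j, cD g (i-1) j = true → 1 ≤ i → eD (i-1) j ∈ s) →
    (cR g i (j0-1) = true → 1 ≤ j0 → eR i (j0-1) ∈ s) →
    ((List.range' j0 k).foldl (fun s (j : Nat) => sA g (i : Int) (j : Int) s) s
       = (List.range' j0 k).foldl (fun s (j : Nat) => sB g i j s) s)
    ∧ (∀ x ∈ s, x ∈ (List.range' j0 k).foldl (fun s (j : Nat) => sB g i j s) s)
    ∧ (∀ j, j0 ≤ j → j < j0 + k → cD g i j = true →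
        eD i j ∈ (List.range' j0 k).foldl (fun s (j : Nat) => sB g i j s) s) := by
  intro k
  induction k with
  | zero =>
    intro j0 s Hup Hleft
    refine ⟨rfl, fun x hx => hx, fun j h1 h2 _ => by omega⟩
  | succ k ih =>
    intro j0 s Hup Hleft
    simp only [List.range'_succ, List.foldl_cons]
    rw [cell_eq g i j0 s (Hup j0) Hleft]
    obtain ⟨ihEq, ihMono, ihDown⟩ := ih (j0+1) (sB g i j0 s)
      (fun j hj hi => mem_sB _ _ _ _ (Hup j hj hi))
      (fun hr _ => by
        rw [show j0 + 1 - 1 = j0 from by omega] at hr ⊢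
        exact sB_right g i j0 s hr)
    refine ⟨ihEq, fun x hx => ihMono x (mem_sB _ _ _ _ hx), fun j h1 h2 hcd => ?_⟩
    by_cases hj : j = j0
    · subst hj
      exact ihMono _ (sB_down g i j s hcd)
    · exact ihDown j (by omega) (by omega) hcd

-- grid-level induction over rows i0..i0+k-1
theorem grid_eq (g : List (List (List (String × String)))) :
    ∀ (k i0 : Nat) (s : List ((Int × Int) × (Int × Int))),
    (∀ j, cD g (i0-1) j = true → 1 ≤ i0 → eD (i0-1) j ∈ s) →
    ((List.range' i0 k).foldl (fun s (i : Nat) =>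
        (List.range (g[i]?.getD []).length).foldl (fun s (j : Nat) => sA g (i : Int) (j : Int) s) s) s
      = (List.range' i0 k).foldl (fun s (i : Nat) =>
        (List.range (g[i]?.getD []).length).foldl (fun s (j : Nat) => sB g i j s) s) s)
    ∧ (∀ j, cD g (i0+k-1) j = true → 1 ≤ i0 + k →
        eD (i0+k-1) j ∈ (List.range' i0 k).foldl (fun s i =>
          (List.range (g[i]?.getD []).length).foldl (fun s (j : Nat) => sB g i j s) s) s) := by
  intro k
  induction k with
  | zero =>
    intro i0 s Hup
    refine ⟨rfl, fun j h1 h2 => Hup j (by simpa using h1) (by omega)⟩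
  | succ k ih =>
    intro i0 s Hup
    simp only [List.range'_succ, List.foldl_cons]
    have hrange : List.range (g[i0]?.getD []).length = List.range' 0 (g[i0]?.getD []).length :=
      List.range_eq_range'
    obtain ⟨rEq, rMono, rDown⟩ := row_eq g i0 (g[i0]?.getD []).length 0 s Hup (fun _ h => by omega)
    rw [hrange, rEq]
    have HupNext : ∀ j, cD g (i0+1-1) j = true → 1 ≤ i0 + 1 →
        eD (i0+1-1) j ∈ (List.range' 0 (g[i0]?.getD []).length).foldl (fun s j => sB g i0 j s) s := by
      intro j hj _
      rw [show i0 + 1 - 1 = i0 from rfl] at hj ⊢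
      have hlt : j < (g[i0]?.getD []).length := by
        unfold cD at hj
        rw [Bool.and_eq_true] at hj
        exact insideN_lt hj.1
      exact rDown j (by omega) (by omega) hj
    obtain ⟨ihEq, ihDown⟩ := ih (i0+1) _ HupNext
    refine ⟨by rw [← hrange] at ihEq ⊢; exact ihEq, ?_⟩
    rw [show i0 + (k+1) - 1 = i0 + 1 + k - 1 from by omega]
    intro j h1 h2
    have h := ihDown j h1 (by omega)
    simp only [List.range_eq_range'] at h ⊢
    exact h

-- the two ports in Nat-indexed normal form
theorem portA_norm (g : List (List (List (String × String)))) :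
    get_connections g = (List.range g.length).foldl (fun s (i : Nat) =>
      (List.range (g[i]?.getD []).length).foldl (fun s (j : Nat) => sA g (i : Int) (j : Int) s) s) [] := by
  unfold get_connections
  rw [PySem.List.pyRange_one]
  simp only [sub_zero]
  rw [List.foldl_map]
  apply PySem.List.foldl_congr_mem
  intro acc i hi
  simp only [zero_add]
  have hrow : pvRowAt g (i : Int) = g[i]?.getD [] := by simp [pvRowAt]
  conv_rhs => rw [← hrow]
  rw [PySem.List.pyRange_one]
  simp only [sub_zero]
  rw [List.foldl_map]
  apply PySem.List.foldl_congr_mem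
  intro acc' j hj
  simp only [zero_add]
  rfl

theorem portB_norm (g : List (List (List (String × String)))) :
    get_connections_alt g = (List.range g.length).foldl (fun s (i : Nat) =>
      (List.range (g[i]?.getD []).length).foldl (fun s (j : Nat) => sB g i j s) s) [] := by
  unfold get_connections_alt
  rw [PySem.List.enumerate_eq_map_pyRange (xs := g) (d := ([] : List (List (String × String))))]
  rw [PySem.List.pyRange_one]
  simp only [sub_zero]
  rw [List.foldl_map, List.foldl_map]
  apply PySem.List.foldl_congr_mem
  intro acc i hi
  simp only [zero_add, PySem.List.pyGetD_natCast, List.getD_eq_getElem?_getD]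
  rw [PySem.List.enumerate_eq_map_pyRange (d := ([] : List (String × String)))]
  rw [PySem.List.pyRange_one]
  simp only [sub_zero]
  rw [List.foldl_map, List.foldl_map]
  apply PySem.List.foldl_congr_mem
  intro acc' j hj
  simp only [zero_add, PySem.List.pyGetD_natCast, List.getD_eq_getElem?_getD]
  rw [show ((j:Int) + 1) = ((j+1 : Nat) : Int) from by omega,
      show ((i:Int) + 1) = ((i+1 : Nat) : Int) from by omega]
  simp only [PySem.List.pyGet?_natCast]
  have hR : (decide (((j+1:Nat):Int) < ((g[i]?.getD []).length : Int)) &&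
      pvInside ((g[i]?.getD [])[j+1]?.getD [])) = insideN g i (j+1) := by
    by_cases hb : j + 1 < (g[i]?.getD []).length
    · have hlt : (j:Int) + 1 < ((g[i]?.getD []).length : Int) := by omega
      simp [insideN, hlt]
    · rw [show (g[i]?.getD [])[j+1]? = none from List.getElem?_eq_none (by omega)]
      simp [insideN, pvInside, show (g[i]?.getD [])[j+1]? = none from List.getElem?_eq_none (by omega)]
      try omega
  rw [hR]
  unfold sB
  by_cases hn : ((i+1:Nat):Int) < (g.length : Int)
  · have hD : (decide ((j:Int) < ((g[(i+1:Nat)]?.getD []).length : Int)) &&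
        pvInside ((g[(i+1:Nat)]?.getD [])[j]?.getD [])) = insideN g (i+1) j := by
      by_cases hb : j < (g[i+1]?.getD []).length
      · have hlt : (j:Int) < ((g[(i+1:Nat)]?.getD []).length : Int) := by omega
        simp [insideN, hlt]
      · rw [show (g[(i+1:Nat)]?.getD [])[j]? = none from List.getElem?_eq_none (by omega)]
        simp [insideN, pvInside, show (g[(i+1:Nat)]?.getD [])[j]? = none from List.getElem?_eq_none (by omega)]
        try omega
    rw [hD]
    simp only [if_pos hn]
    push_cast
    simp [insideN, eR]
    try rfl
  · have hfD : insideN g (i+1) j = false := by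
      unfold insideN
      rw [show g[i+1]? = none from List.getElem?_eq_none (by omega)]
      simp [pvInside]
    simp only [if_neg hn, hfD, Bool.false_eq_true, if_false]
    push_cast
    simp [insideN, eR]
    try rfl

-- ===== VERDICT (by name: the statement is the Claim_ definition above) =====
theorem get_connections_spec : Claim_equal_get_connections := by
  unfold Claim_equal_get_connections Spec_get_connections
  intro g _ _
  rw [portA_norm, portB_norm]
  rw [List.range_eq_range']
  exact (grid_eq g g.length 0 [] (fun j _ h => by omega)).1
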